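-- pv_equiv track=rewrite | github.com/JD0111phys/biased_noise_tile_code | error_propagation/pauli_distribution/pauli_strings.py | _coalesce_disjoint_gate_layers
-- ===== SOURCE A (Python) =====
-- from typing import List, Tuple, Dict, Optional, Any, cast
--
-- GateOp = Tuple[str, List[int]]
--
-- def _coalesce_disjoint_gate_layers(
--     gate_sequence: List[GateOp],
--     keep_qubits: List[int],
-- ) -> List[Tuple[List[GateOp], List[int]]]:
--     """Group consecutive disjoint gates into one logical timestep.
--
--     Gates remain in-order within each layer; a new layer starts when the next gate
--     overlaps any qubit already used in the current layer.
--     """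
--     layers: List[Tuple[List[GateOp], List[int]]] = []
--     current_ops: List[GateOp] = []
--     current_used: set[int] = set()
--
--     for gate_name, targets in gate_sequence:
--         target_set = set(targets)
--         if current_ops and current_used.intersection(target_set):
--             idle_qubits = [q for q in keep_qubits if q not in current_used]
--             layers.append((current_ops, idle_qubits))
--             current_ops = []
--             current_used = set()
--
--         current_ops.append((gate_name, targets))
--         current_used.update(target_set)
--
--     if current_ops:
--         idle_qubits = [q for q in keep_qubits if q not in current_used]
--         layers.append((current_ops, idle_qubits))
--
--     return layers
-- ===== SOURCE B (Python) =====
-- def _coalesce_disjoint_gate_layers(gate_sequence, keep_qubits):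
--     """Split-based rewrite: repeatedly peel the longest disjoint prefix off the
--     remaining sequence, then pair it with its idle qubits."""
--     layers = []
--     rest = gate_sequence
--     while rest:
--         used = set(rest[0][1])
--         i = 1
--         while i < len(rest) and used.isdisjoint(rest[i][1]):
--             used.update(rest[i][1])
--             i += 1
--         layers.append((rest[:i], [q for q in keep_qubits if q not in used]))
--         rest = rest[i:]
--     return layers
-- ===== Notes on version B (the rewrite author's own statement) =====
-- stated objective: alternative
-- what changed: Replaces the single accumulator loop (current_ops/current_used carried across iterations with an end-of-loop flush) by an outer loop that repeatedly peels the longest disjoint prefix off the remaining sequence with an inner index scan and slicing, so no partial-layer state survives between layers and no final flush is needed.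
import Mathlib
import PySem

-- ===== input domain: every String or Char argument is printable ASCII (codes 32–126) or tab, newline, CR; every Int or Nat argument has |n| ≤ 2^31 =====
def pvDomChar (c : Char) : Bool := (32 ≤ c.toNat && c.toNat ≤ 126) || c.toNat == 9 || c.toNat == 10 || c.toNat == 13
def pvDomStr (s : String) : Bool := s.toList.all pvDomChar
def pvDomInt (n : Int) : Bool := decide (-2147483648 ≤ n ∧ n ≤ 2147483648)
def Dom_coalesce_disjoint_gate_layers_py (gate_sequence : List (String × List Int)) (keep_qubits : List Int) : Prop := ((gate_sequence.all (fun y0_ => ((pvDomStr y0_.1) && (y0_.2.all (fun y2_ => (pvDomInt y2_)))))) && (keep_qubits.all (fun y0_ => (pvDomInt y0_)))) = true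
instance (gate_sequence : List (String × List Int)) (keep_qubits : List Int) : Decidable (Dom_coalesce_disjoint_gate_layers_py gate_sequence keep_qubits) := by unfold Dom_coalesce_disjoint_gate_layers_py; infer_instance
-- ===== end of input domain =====

-- B replaces A's single accumulator loop by repeatedly peeling the longest disjoint
-- prefix off the remaining sequence (alternative decomposition, same cost).

-- ===== PORT A =====
-- idle_qubits = [q for q in keep_qubits if q not in used]
def pvIdle (keep_qubits : List Int) (used : PySem.Set Int) : List Int :=
  keep_qubits.filter (fun q => !(PySem.Set.contains used q))

-- A's loop body: state = (layers, current_ops, current_used); the break branch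
-- (flush + reset) is followed by the unconditional append/update of the iteration
def pvStepA (keep_qubits : List Int)
    (st : List ((List (String × List Int)) × List Int) × List (String × List Int) × PySem.Set Int)
    (g : String × List Int) :
    List ((List (String × List Int)) × List Int) × List (String × List Int) × PySem.Set Int :=
  let target_set : PySem.Set Int := PySem.Set.ofList g.2
  if !st.2.1.isEmpty && !(PySem.Set.inter st.2.2 target_set).isEmpty then
    (st.1 ++ [(st.2.1, pvIdle keep_qubits st.2.2)], [] ++ [g],
      PySem.Set.update PySem.Set.empty target_set)
  else (st.1, st.2.1 ++ [g], PySem.Set.update st.2.2 target_set)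

-- the final 'if current_ops:' flush after the loop
def pvFlushA (keep_qubits : List Int)
    (st : List ((List (String × List Int)) × List Int) × List (String × List Int) × PySem.Set Int) :
    List ((List (String × List Int)) × List Int) :=
  if !st.2.1.isEmpty then st.1 ++ [(st.2.1, pvIdle keep_qubits st.2.2)] else st.1

def coalesce_disjoint_gate_layers_py (gate_sequence : List (String × List Int)) (keep_qubits : List Int) : List ((List (String × List Int)) × List Int) :=
  pvFlushA keep_qubits (gate_sequence.foldl (pvStepA keep_qubits) ([], [], PySem.Set.empty))

-- ===== PORT B =====
-- B's inner while loop: extend the layer while the next gate is disjoint from `used`;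
-- returns (number of further gates taken, final used set)
def pvSplit (used : PySem.Set Int) (rest : List (String × List Int)) : Nat × PySem.Set Int :=
  match rest with
  | [] => (0, used)
  | g :: t =>
    if PySem.Set.isdisjoint used g.2 then
      let p := pvSplit (PySem.Set.update used g.2) t
      (p.1 + 1, p.2)
    else (0, used)

-- B's outer while loop; rest[:i] / rest[i:] with 0 ≤ i ≤ len rest are take/drop
def coalesce_disjoint_gate_layers_py_alt (gate_sequence : List (String × List Int)) (keep_qubits : List Int) : List ((List (String × List Int)) × List Int) :=
  match gate_sequence with
  | [] => []
  | g :: t =>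
    let p := pvSplit (PySem.Set.ofList g.2) t
    ((g :: t.take p.1, keep_qubits.filter (fun q => !(PySem.Set.contains p.2 q)))
      :: coalesce_disjoint_gate_layers_py_alt (t.drop p.1) keep_qubits)
termination_by gate_sequence.length
decreasing_by simp [List.length_drop]

-- ===== PRECONDITION & SPEC =====
def Spec_coalesce_disjoint_gate_layers_py (gate_sequence : List (String × List Int)) (keep_qubits : List Int) (out : List ((List (String × List Int)) × List Int)) : Prop := out = coalesce_disjoint_gate_layers_py_alt gate_sequence keep_qubits
instance (gate_sequence : List (String × List Int)) (keep_qubits : List Int) (out : List ((List (String × List Int)) × List Int)) : Decidable (Spec_coalesce_disjoint_gate_layers_py gate_sequence keep_qubits out) := by unfold Spec_coalesce_disjoint_gate_layers_py; infer_instance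

-- ===== CLAIM (what is proved, stated in full; the proofs are below) =====
def Claim_equal_coalesce_disjoint_gate_layers_py : Prop := ∀ (gate_sequence : List (String × List Int)) (keep_qubits : List Int), Dom_coalesce_disjoint_gate_layers_py gate_sequence keep_qubits → Spec_coalesce_disjoint_gate_layers_py gate_sequence keep_qubits (coalesce_disjoint_gate_layers_py gate_sequence keep_qubits)

-- ===== LEMMAS AND PROOFS =====

theorem pvAlt_nil (keep_qubits : List Int) :
    coalesce_disjoint_gate_layers_py_alt [] keep_qubits = [] := by
  rw [coalesce_disjoint_gate_layers_py_alt]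

-- the idle-qubit filter only depends on the membership of the set
theorem pvIdle_cong (keep_qubits : List Int) (u1 u2 : PySem.Set Int)
    (h : ∀ q, q ∈ u1 ↔ q ∈ u2) :
    keep_qubits.filter (fun q => !(PySem.Set.contains u1 q))
      = keep_qubits.filter (fun q => !(PySem.Set.contains u2 q)) := by
  apply List.filter_congr
  intro q _
  congr 1
  by_cases hq : q ∈ u2
  · rw [(PySem.Set.contains_iff u1 q).mpr ((h q).mpr hq), (PySem.Set.contains_iff u2 q).mpr hq]
  · rw [Bool.eq_false_iff.mpr (fun hc => hq ((h q).mp ((PySem.Set.contains_iff u1 q).mp hc))),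
        Bool.eq_false_iff.mpr (fun hc => hq ((PySem.Set.contains_iff u2 q).mp hc))]

-- pvSplit only depends on the membership of `used`
theorem pvSplit_cong (rest : List (String × List Int)) (u1 u2 : PySem.Set Int)
    (h : ∀ q, q ∈ u1 ↔ q ∈ u2) :
    (pvSplit u1 rest).1 = (pvSplit u2 rest).1 ∧
      (∀ q, q ∈ (pvSplit u1 rest).2 ↔ q ∈ (pvSplit u2 rest).2) := by
  induction rest generalizing u1 u2 with
  | nil => exact ⟨rfl, h⟩
  | cons g t ih =>
    have hd : PySem.Set.isdisjoint u1 g.2 = PySem.Set.isdisjoint u2 g.2 := by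
      by_cases h1 : PySem.Set.isdisjoint u1 g.2 = true
      · rw [h1]; symm
        rw [PySem.Set.isdisjoint_iff] at h1 ⊢
        intro x hx; exact h1 x ((h x).mpr hx)
      · have h2 : PySem.Set.isdisjoint u2 g.2 ≠ true := by
          intro h2; apply h1
          rw [PySem.Set.isdisjoint_iff] at h2 ⊢
          intro x hx; exact h2 x ((h x).mp hx)
        simp [Bool.eq_false_iff.mpr h1, Bool.eq_false_iff.mpr h2]
    simp only [pvSplit]
    rw [hd]
    by_cases hc : PySem.Set.isdisjoint u2 g.2 = true
    · rw [if_pos hc, if_pos hc]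
      have ih' := ih (PySem.Set.update u1 g.2) (PySem.Set.update u2 g.2)
        (by intro q; simp [PySem.Set.mem_update, h q])
      exact ⟨by rw [ih'.1], ih'.2⟩
    · rw [if_neg hc, if_neg hc]
      exact ⟨rfl, h⟩

-- B at a nonempty list, with the starting set replaced by a membership-equal one
theorem pvAlt_cons_cong (g : String × List Int) (t : List (String × List Int))
    (keep_qubits : List Int) (u : PySem.Set Int)
    (h : ∀ q, q ∈ u ↔ q ∈ g.2) :
    coalesce_disjoint_gate_layers_py_alt (g :: t) keep_qubits
      = ((g :: t.take (pvSplit u t).1,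
          keep_qubits.filter (fun q => !(PySem.Set.contains (pvSplit u t).2 q)))
          :: coalesce_disjoint_gate_layers_py_alt (t.drop (pvSplit u t).1) keep_qubits) := by
  rw [coalesce_disjoint_gate_layers_py_alt]
  have hcong := pvSplit_cong t (PySem.Set.ofList g.2) u
    (by intro q; rw [PySem.Set.mem_ofList]; exact (h q).symm)
  rw [hcong.1]
  congr 2
  exact pvIdle_cong keep_qubits (pvSplit (PySem.Set.ofList g.2) t).2 (pvSplit u t).2 hcong.2

-- A's remaining fold + flush from a mid-layer state = finish the current layer via
-- pvSplit, then continue with B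
theorem pvMain (gs : List (String × List Int)) (keep_qubits : List Int)
    (layers : List ((List (String × List Int)) × List Int))
    (cur : List (String × List Int)) (used : PySem.Set Int) (hcur : cur ≠ []) :
    pvFlushA keep_qubits (gs.foldl (pvStepA keep_qubits) (layers, cur, used))
    = layers ++
      ((cur ++ gs.take (pvSplit used gs).1,
        keep_qubits.filter (fun q => !(PySem.Set.contains (pvSplit used gs).2 q)))
        :: coalesce_disjoint_gate_layers_py_alt (gs.drop (pvSplit used gs).1) keep_qubits) := by
  induction gs generalizing layers cur used with
  | nil =>
    simp [pvFlushA, pvSplit, pvIdle, pvAlt_nil, hcur]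
  | cons g t ih =>
    have hbr : (!(PySem.Set.inter used (PySem.Set.ofList g.2)).isEmpty)
        = !PySem.Set.isdisjoint used g.2 := by
      by_cases hd : PySem.Set.isdisjoint used g.2 = true
      · rw [hd]
        have : PySem.Set.inter used (PySem.Set.ofList g.2) = [] := by
          rw [List.eq_nil_iff_forall_not_mem]
          intro x hx
          rw [PySem.Set.mem_inter] at hx
          exact (PySem.Set.isdisjoint_iff used g.2).mp hd x hx.1
            ((PySem.Set.mem_ofList g.2 x).mp hx.2)
        simp [this]
      · rw [Bool.eq_false_iff.mpr hd]
        have hd' := hd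
        rw [PySem.Set.isdisjoint_iff] at hd'
        simp only [not_forall, not_not] at hd'
        obtain ⟨x, hx1, hx2⟩ := hd'
        have : x ∈ PySem.Set.inter used (PySem.Set.ofList g.2) := by
          rw [PySem.Set.mem_inter]
          exact ⟨hx1, (PySem.Set.mem_ofList g.2 x).mpr hx2⟩
        simp [List.ne_nil_of_mem this]
    by_cases hd : PySem.Set.isdisjoint used g.2 = true
    · -- no break: gate joins the current layer
      have hstep : pvStepA keep_qubits (layers, cur, used) g
          = (layers, cur ++ [g], PySem.Set.update used (PySem.Set.ofList g.2)) := by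
        simp [pvStepA, hbr, hd]
      rw [List.foldl_cons, hstep, ih layers (cur ++ [g]) _ (by simp)]
      have hcong := pvSplit_cong t (PySem.Set.update used (PySem.Set.ofList g.2))
        (PySem.Set.update used g.2)
        (by intro q; simp [PySem.Set.mem_update, PySem.Set.mem_ofList])
      simp only [pvSplit, hd, if_true]
      rw [hcong.1, pvIdle_cong keep_qubits _ _ hcong.2]
      simp [List.append_assoc]
    · -- break: flush the current layer, start a new one with g
      have hstep : pvStepA keep_qubits (layers, cur, used) g
          = (layers ++ [(cur, pvIdle keep_qubits used)], [] ++ [g],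
             PySem.Set.update PySem.Set.empty (PySem.Set.ofList g.2)) := by
        simp [pvStepA, hbr, Bool.eq_false_iff.mpr hd, hcur]
      rw [List.foldl_cons, hstep, ih _ ([] ++ [g]) _ (by simp)]
      have hsplit : pvSplit used (g :: t) = (0, used) := by
        simp only [pvSplit]; rw [if_neg hd]
      rw [hsplit]
      simp only [List.take_zero, List.drop_zero, List.append_nil, List.nil_append,
        List.append_assoc, List.singleton_append]
      rw [pvAlt_cons_cong g t keep_qubits (PySem.Set.update PySem.Set.empty (PySem.Set.ofList g.2))
          (by intro q; simp [PySem.Set.mem_update, PySem.Set.mem_ofList, PySem.Set.empty])]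
      simp [pvIdle]

-- ===== VERDICT (by name: the statement is the Claim_ definition above) =====
theorem coalesce_disjoint_gate_layers_py_spec : Claim_equal_coalesce_disjoint_gate_layers_py := by
  intro gs keep _
  unfold Spec_coalesce_disjoint_gate_layers_py coalesce_disjoint_gate_layers_py
  match gs with
  | [] => simp [pvFlushA, pvAlt_nil]
  | g :: t =>
    have hstep : pvStepA keep ([], [], PySem.Set.empty) g
        = ([], [] ++ [g], PySem.Set.update PySem.Set.empty (PySem.Set.ofList g.2)) := by
      simp [pvStepA]
    rw [List.foldl_cons, hstep, pvMain t keep [] ([] ++ [g]) _ (by simp)]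
    simp only [List.nil_append]
    exact (pvAlt_cons_cong g t keep _
      (by intro q; simp [PySem.Set.mem_update, PySem.Set.mem_ofList, PySem.Set.empty])).symm
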